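-- pv_equiv track=rewrite | github.com/corentinlunel/corentinlunel.github.io | Final_entrelacs.py | rpdoc
-- ===== SOURCE A (Python) =====
-- odr = [1,4,6,7,8,9,10]        # autorisés à droite si brin
--
-- oga = [1,3,5,7,8,9,10]        # autorisés à gauche si brin
--
-- def icolonne(i,m):
--
--     """insère une colonne en i"""
--
--     M = []
--     for k in m:
--         v = 0
--         if k[i-1] in oga and k[i] in odr :
--             v = 1
--         M += [k[:i] + [v] + k[i:]]
--     return M
--
-- def rpdoc(m,i,j) :
--
--     """remplace un 9 ou 10 en m[i][j] par des chevrons"""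
--
--     M = m.copy()
--     if M[i][j] in [9,10] :
--         M = icolonne(j+1,M)
--         if M[i][j] == 9 :
--             M[i][j+1] = 3
--             M[i][j] = 6
--             for k in range(i+1,len(M)):
--                 M[k][j+1]=M[k][j]
--                 if M[k][j+1] in odr and M[k][j-1] in oga :
--                     M[k][j]= 1
--                 else :
--                     M[k][j] = 0
--         else :
--             M[i][j+1] = 5
--             M[i][j] = 4
--             for k in range(0,i):
--                 M[k][j+1]=M[k][j]
--                 if M[k][j+1] in odr and M[k][j-1] in oga :
--                     M[k][j]= 1
--                 else :
--                     M[k][j] = 0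
--     return M
-- ===== SOURCE B (Python) =====
-- odr = [1,4,6,7,8,9,10]        # autorisés à droite si brin
--
-- oga = [1,3,5,7,8,9,10]        # autorisés à gauche si brin
--
--
-- def _chev_row(nine, i, j, k, r):
--     """row k of the result, built directly from the original row r"""
--     if k == i:
--         pair = [6, 3] if nine else [4, 5]
--         return r[:j] + pair + r[j+1:]
--     if (k > i) == nine:
--         w = 1 if r[j] in odr and r[j-1] in oga else 0
--         return r[:j] + [w, r[j]] + r[j+1:]
--     v = 1 if r[j] in oga and r[j+1] in odr else 0
--     return r[:j+1] + [v] + r[j+1:]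
--
--
-- def rpdoc(m, i, j):
--     """remplace un 9 ou 10 en m[i][j] par des chevrons"""
--     if m[i][j] not in (9, 10):
--         return m.copy()
--     nine = m[i][j] == 9
--     return [_chev_row(nine, i, j, k, r) for k, r in enumerate(m)]
-- ===== Notes on version B (the rewrite author's own statement) =====
-- stated objective: simpler
-- what changed: B builds the result in a single pass over the original rows, computing each output row directly from its input row by a three-way case split (special row, affected side, other rows), instead of A's insert-a-column pass followed by an in-place fixup loop over the mutated matrix.
-- outside the precondition, e.g. on rpdoc([[1, 2], [9, 2]], -1, 0): A returns [[0, 1, 2], [0, 6, 2]], B returns [[0, 1, 2], [0, 9, 2]]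
import Mathlib
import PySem

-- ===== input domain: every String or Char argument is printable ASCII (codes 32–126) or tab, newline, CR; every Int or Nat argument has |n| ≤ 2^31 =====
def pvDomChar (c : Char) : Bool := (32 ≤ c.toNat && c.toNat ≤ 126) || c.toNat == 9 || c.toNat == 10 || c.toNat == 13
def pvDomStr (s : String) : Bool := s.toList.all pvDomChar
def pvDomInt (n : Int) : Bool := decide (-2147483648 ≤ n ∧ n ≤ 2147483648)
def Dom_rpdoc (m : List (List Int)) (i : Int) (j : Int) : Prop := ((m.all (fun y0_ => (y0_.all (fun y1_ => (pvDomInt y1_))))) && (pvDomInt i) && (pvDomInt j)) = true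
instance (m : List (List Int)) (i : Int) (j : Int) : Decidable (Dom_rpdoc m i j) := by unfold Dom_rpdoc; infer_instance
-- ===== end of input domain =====

-- B builds the result in ONE pass over the original rows (each output row computed directly
-- from its input row) instead of A's insert-a-column pass followed by an in-place fixup loop;
-- objective: simpler/alternative decomposition, same asymptotic cost.

-- ===== PORT A =====
-- module constants shared by both Python versions
def odrL : List Int := [1,4,6,7,8,9,10]
def ogaL : List Int := [1,3,5,7,8,9,10]

-- literal port of icolonne: foldl appending one built row per input row
def icolonne (i : Int) (m : List (List Int)) : List (List Int) :=
  m.foldl (fun M k =>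
    M ++ [PySem.List.slice k none (some i) ++
          [if PySem.List.pyGetD k (i-1) 0 ∈ ogaL ∧ PySem.List.pyGetD k i 0 ∈ odrL then (1:Int) else 0] ++
          PySem.List.slice k (some i) none]) []

def rpdoc (m : List (List Int)) (i : Int) (j : Int) : List (List Int) :=
  let M := m
  if PySem.List.pyGetD (PySem.List.pyGetD M i []) j 0 ∈ ([9,10] : List Int) then
    let M := icolonne (j+1) M
    if PySem.List.pyGetD (PySem.List.pyGetD M i []) j 0 = 9 then
      let M := PySem.List.pySetD M i (PySem.List.pySetD (PySem.List.pyGetD M i []) (j+1) 3)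
      let M := PySem.List.pySetD M i (PySem.List.pySetD (PySem.List.pyGetD M i []) j 6)
      (PySem.List.pyRange (i+1) (M.length : Int) 1).foldl (fun M k =>
        let row := PySem.List.pySetD (PySem.List.pyGetD M k []) (j+1)
                     (PySem.List.pyGetD (PySem.List.pyGetD M k []) j 0)
        let row := PySem.List.pySetD row j
                     (if PySem.List.pyGetD row (j+1) 0 ∈ odrL ∧ PySem.List.pyGetD row (j-1) 0 ∈ ogaL
                      then (1:Int) else 0)
        PySem.List.pySetD M k row) M
    else
      let M := PySem.List.pySetD M i (PySem.List.pySetD (PySem.List.pyGetD M i []) (j+1) 5)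
      let M := PySem.List.pySetD M i (PySem.List.pySetD (PySem.List.pyGetD M i []) j 4)
      (PySem.List.pyRange 0 i 1).foldl (fun M k =>
        let row := PySem.List.pySetD (PySem.List.pyGetD M k []) (j+1)
                     (PySem.List.pyGetD (PySem.List.pyGetD M k []) j 0)
        let row := PySem.List.pySetD row j
                     (if PySem.List.pyGetD row (j+1) 0 ∈ odrL ∧ PySem.List.pyGetD row (j-1) 0 ∈ ogaL
                      then (1:Int) else 0)
        PySem.List.pySetD M k row) M
  else M

-- ===== PORT B =====
-- port of _chev_row: row k of the result, built directly from the original row r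
def chevRow (nine : Bool) (i : Int) (j : Int) (k : Int) (r : List Int) : List Int :=
  if k = i then
    PySem.List.slice r none (some j) ++ (if nine then [6,3] else [4,5]) ++
      PySem.List.slice r (some (j+1)) none
  else if (decide (i < k)) = nine then
    PySem.List.slice r none (some j) ++
      [(if PySem.List.pyGetD r j 0 ∈ odrL ∧ PySem.List.pyGetD r (j-1) 0 ∈ ogaL then (1:Int) else 0),
       PySem.List.pyGetD r j 0] ++
      PySem.List.slice r (some (j+1)) none
  else
    PySem.List.slice r none (some (j+1)) ++
      [(if PySem.List.pyGetD r j 0 ∈ ogaL ∧ PySem.List.pyGetD r (j+1) 0 ∈ odrL then (1:Int) else 0)] ++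
      PySem.List.slice r (some (j+1)) none

def rpdoc_alt (m : List (List Int)) (i : Int) (j : Int) : List (List Int) :=
  if PySem.List.pyGetD (PySem.List.pyGetD m i []) j 0 ∉ ([9,10] : List Int) then m
  else
    let nine := PySem.List.pyGetD (PySem.List.pyGetD m i []) j 0 == 9
    (PySem.List.enumerate m 0).map (fun p => chevRow nine i j p.1 p.2)

-- ===== PRECONDITION & SPEC =====
-- Pre_ requires in-range indices, and canonical (non-negative) i, j with every row longer than
-- j+1 when the 9/10 branch fires: on negative i or j with the branch taken, Python's
-- negative-index wraparound makes A's raw-index fixup loop revisit row i — an accident of A's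
-- in-place implementation, excluded as a defensible corner; other excluded inputs make A raise.
def Pre_rpdoc (m : List (List Int)) (i : Int) (j : Int) : Prop :=
  PySem.Raise.InRange m.length i ∧
  PySem.Raise.InRange (PySem.List.pyGetD m i []).length j ∧
  (PySem.List.pyGetD (PySem.List.pyGetD m i []) j 0 ∈ ([9,10] : List Int) →
    0 ≤ i ∧ 0 ≤ j ∧ ∀ r ∈ m, j + 1 < (r.length : Int))
instance (m : List (List Int)) (i : Int) (j : Int) : Decidable (Pre_rpdoc m i j) := by
  unfold Pre_rpdoc; infer_instance

def pvWitness_rpdoc : List (List Int) × Int × Int := ([[9,2],[1,2]], 0, 0)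

def Spec_rpdoc (m : List (List Int)) (i : Int) (j : Int) (out : List (List Int)) : Prop := out = rpdoc_alt m i j
instance (m : List (List Int)) (i : Int) (j : Int) (out : List (List Int)) : Decidable (Spec_rpdoc m i j out) := by unfold Spec_rpdoc; infer_instance

-- ===== CLAIM (what is proved, stated in full; the proofs are below) =====
def Claim_equal_rpdoc : Prop := ∀ (m : List (List Int)) (i : Int) (j : Int), Dom_rpdoc m i j → Pre_rpdoc m i j → Spec_rpdoc m i j (rpdoc m i j)

-- ===== LEMMAS AND PROOFS =====

-- the row icolonne builds for insertion point c
def icRow (c : Int) (r : List Int) : List Int :=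
  PySem.List.slice r none (some c) ++
  [if PySem.List.pyGetD r (c-1) 0 ∈ ogaL ∧ PySem.List.pyGetD r c 0 ∈ odrL then (1:Int) else 0] ++
  PySem.List.slice r (some c) none

theorem icolonne_eq_map (c : Int) (m : List (List Int)) : icolonne c m = m.map (icRow c) := by
  unfold icolonne icRow
  simpa using PySem.List.foldl_append_singleton_eq_map _ m []

-- the per-row update A's fixup loop performs
def fixRow (j : Int) (r : List Int) : List Int :=
  PySem.List.pySetD (PySem.List.pySetD r (j+1) (PySem.List.pyGetD r j 0)) j
    (if PySem.List.pyGetD (PySem.List.pySetD r (j+1) (PySem.List.pyGetD r j 0)) (j+1) 0 ∈ odrL ∧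
        PySem.List.pyGetD (PySem.List.pySetD r (j+1) (PySem.List.pyGetD r j 0)) (j-1) 0 ∈ ogaL
     then (1:Int) else 0)

-- A's in-place loop over indices [a, b) rewrites exactly the rows a..b-1 through g
theorem loop_fix (g : List Int → List Int) :
    ∀ (n a b : Nat) (M : List (List Int)), b ≤ M.length → a + n = b →
    (PySem.List.pyRange (a:Int) (b:Int) 1).foldl
      (fun M k => PySem.List.pySetD M k (g (PySem.List.pyGetD M k []))) M
    = M.take a ++ ((M.drop a).take n).map g ++ M.drop b := by
  intro n
  induction n with
  | zero =>
    intro a b M hb hab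
    rw [PySem.List.pyRange_one_eq_nil (by omega)]
    subst hab
    simp [List.take_append_drop]
  | succ n ih =>
    intro a b M hb hab
    have hab' : (a:Int) < (b:Int) := by exact_mod_cast (by omega : a < b)
    have haM : a < M.length := by omega
    rw [PySem.List.pyRange_one_cons hab', List.foldl_cons]
    have hget : PySem.List.pyGetD M (a:Int) [] = M[a] := by
      rw [PySem.List.pyGetD_eq_getElem M [] (by positivity) (by exact_mod_cast haM)]
      simp
    rw [PySem.List.pySetD_natCast, hget]
    have hcast : ((a:Int)+1) = ((a+1 : Nat) : Int) := by push_cast; ring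
    rw [hcast, ih (a+1) b (M.set a (g M[a])) (by simpa using hb) (by omega)]
    rw [List.set_eq_take_cons_drop _ haM]
    have hlt : (M.take a).length = a := by simp [haM.le]
    rw [show a + 1 = (M.take a).length + 1 by rw [hlt],
        List.take_length_add_append, List.drop_length_add_append]
    rw [show b = (M.take a).length + (b - a) by omega, List.drop_length_add_append]
    have hdropa : M.drop a = M[a] :: M.drop (a+1) := List.drop_eq_getElem_cons haM
    rw [hdropa]
    simp only [hlt, List.take_succ_cons, List.take_zero, List.drop_succ_cons,
               List.drop_zero, List.map_cons]
    rw [show b - a = (b - (a+1)) + 1 by omega, List.drop_succ_cons, List.drop_drop]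
    rw [show a + 1 + (b - (a+1)) = b by omega, show a + (b - (a+1) + 1) = b by omega]
    simp

-- enumerate-map collapses to a plain map when f ignores indices uniformly on the range
theorem enum_map_eq_map {α : Type} (f : Int → α → α) (g : α → α) :
    ∀ (xs : List α) (s : Int), (∀ k r, r ∈ xs → s ≤ k → k < s + xs.length → f k r = g r) →
    (PySem.List.enumerate xs s).map (fun p => f p.1 p.2) = xs.map g := by
  intro xs
  induction xs with
  | nil => intro s _; simp [PySem.List.enumerate]
  | cons x xs ih =>
    intro s h
    rw [PySem.List.enumerate_cons]
    simp only [List.map_cons]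
    rw [h s x (by simp) le_rfl (by simp only [List.length_cons]; push_cast; omega)]
    rw [ih (s+1) (fun k r hr h1 h2 => h k r (by simp [hr]) (by omega)
        (by simp only [List.length_cons] at h2 ⊢; push_cast at h2 ⊢; omega))]

-- reading index j of a decomposed row
theorem pyGetD_decomp (t s : List Int) (x : Int) (j : Nat) (ht : t.length = j) :
    PySem.List.pyGetD (t ++ x :: s) (j:Int) 0 = x := by
  simp [ht]

theorem pyGetD_decomp_succ (t s : List Int) (x w : Int) (j : Nat) (ht : t.length = j) :
    PySem.List.pyGetD (t ++ x :: w :: s) ((j:Int)+1) 0 = w := by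
  have h1 : ((j:Int)+1) = ((j+1 : Nat) : Int) := by push_cast; ring
  rw [h1, PySem.List.pyGetD_natCast]
  simp [List.getD, ht]

-- slices of a decomposed row
theorem slice_to_decomp (t s : List Int) (x : Int) (j : Nat) (ht : t.length = j) :
    PySem.List.slice (t ++ x :: s) none (some (j:Int)) = t := by
  rw [PySem.List.slice_to_natCast]
  simp [← ht]

theorem slice_to_decomp_succ (t s : List Int) (x : Int) (j : Nat) (ht : t.length = j) :
    PySem.List.slice (t ++ x :: s) none (some ((j:Int)+1)) = t ++ [x] := by
  have h1 : ((j:Int)+1) = ((j+1 : Nat) : Int) := by push_cast; ring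
  rw [h1, PySem.List.slice_to_natCast]
  rw [show j + 1 = t.length + 1 by omega, List.take_length_add_append]
  simp

theorem slice_from_decomp_succ (t s : List Int) (x : Int) (j : Nat) (ht : t.length = j) :
    PySem.List.slice (t ++ x :: s) (some ((j:Int)+1)) none = s := by
  have h1 : ((j:Int)+1) = ((j+1 : Nat) : Int) := by push_cast; ring
  rw [h1, PySem.List.slice_from_natCast]
  rw [show j + 1 = t.length + 1 by omega, List.drop_length_add_append]
  simp

-- icolonne's row on a decomposed row
theorem icRow_decomp (t s : List Int) (x y : Int) (j : Nat) (ht : t.length = j) :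
    icRow ((j:Int)+1) (t ++ x :: y :: s)
    = t ++ x :: (if x ∈ ogaL ∧ y ∈ odrL then (1:Int) else 0) :: y :: s := by
  unfold icRow
  rw [show ((j:Int)+1-1) = (j:Int) by ring]
  rw [pyGetD_decomp t (y::s) x j ht, pyGetD_decomp_succ t s x y j ht,
      slice_to_decomp_succ t (y::s) x j ht, slice_from_decomp_succ t (y::s) x j ht]
  simp

-- the j-1 read A performs on the updated row equals the one B performs on the original row
theorem read_prev_decomp (t s : List Int) (x y : Int) (j : Nat) (ht : t.length = j) :
    PySem.List.pyGetD (t ++ x :: x :: y :: s) ((j:Int)-1) 0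
    = PySem.List.pyGetD (t ++ x :: y :: s) ((j:Int)-1) 0 := by
  cases j with
  | zero =>
    have ht0 : t = [] := List.eq_nil_of_length_eq_zero ht
    subst ht0
    simp only [List.nil_append, Nat.cast_zero, zero_sub]
    rw [PySem.List.pyGetD_neg_one _ _ (by simp), PySem.List.pyGetD_neg_one _ _ (by simp)]
    rw [List.getLast_cons (by simp)]
  | succ n =>
    have h1 : ((n+1 : Nat):Int) - 1 = ((n : Nat) : Int) := by push_cast; ring
    rw [h1, PySem.List.pyGetD_natCast, PySem.List.pyGetD_natCast]
    simp [List.getD, List.getElem?_append, show n < t.length by omega]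

-- A's fixup of a column-inserted decomposed row
theorem fix_decomp (t s : List Int) (x v y : Int) (j : Nat) (ht : t.length = j) :
    fixRow (j:Int) (t ++ x :: v :: y :: s)
    = t ++ (if x ∈ odrL ∧ PySem.List.pyGetD (t ++ x :: y :: s) ((j:Int)-1) 0 ∈ ogaL
            then (1:Int) else 0) :: x :: y :: s := by
  unfold fixRow
  rw [pyGetD_decomp t (v::y::s) x j ht]
  have h1 : PySem.List.pySetD (t ++ x :: v :: y :: s) ((j:Int)+1) x = t ++ x :: x :: y :: s := by
    rw [PySem.List.pySetD_of_nonneg _ _ (by positivity)]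
    rw [show ((j:Int)+1).toNat = j + 1 by omega]
    rw [show j + 1 = t.length + 1 by omega, List.set_append_right _ _ (by omega)]
    simp
  rw [h1]
  rw [pyGetD_decomp_succ t (y::s) x x j ht]
  rw [read_prev_decomp t s x y j ht]
  rw [PySem.List.pySetD_of_nonneg _ _ (by positivity), Int.toNat_natCast]
  rw [show j = t.length by omega, List.set_append_right _ _ (by omega)]
  simp

-- every row admits the decomposition around columns j, j+1
theorem row_decomp (r : List Int) (j : Nat) (h : j + 1 < r.length) :
    ∃ t x y s, r = t ++ x :: y :: s ∧ t.length = j := by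
  refine ⟨r.take j, r[j], r[j+1], r.drop (j+2), ?_, by simp [List.length_take]; omega⟩
  have h2 : r.drop j = r[j] :: r.drop (j+1) := List.drop_eq_getElem_cons (by omega)
  have h3 : r.drop (j+1) = r[j+1] :: r.drop (j+2) := List.drop_eq_getElem_cons (by omega)
  conv_lhs => rw [← List.take_append_drop j r, h2, h3]

-- single writes on a decomposed row
theorem pySet_here_decomp (t s : List Int) (x a : Int) (j : Nat) (ht : t.length = j) :
    PySem.List.pySetD (t ++ x :: s) (j:Int) a = t ++ a :: s := by
  rw [PySem.List.pySetD_of_nonneg _ _ (by positivity), Int.toNat_natCast]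
  rw [show j = t.length by omega, List.set_append_right _ _ (by omega)]
  simp

theorem pySet_succ_decomp (t s : List Int) (x v b : Int) (j : Nat) (ht : t.length = j) :
    PySem.List.pySetD (t ++ x :: v :: s) ((j:Int)+1) b = t ++ x :: b :: s := by
  rw [PySem.List.pySetD_of_nonneg _ _ (by positivity)]
  rw [show ((j:Int)+1).toNat = j + 1 by omega]
  rw [show j + 1 = t.length + 1 by omega, List.set_append_right _ _ (by omega)]
  simp

-- take/drop of a list after a set
theorem set_take_drop {A : Type} (l : List A) (nn : Nat) (v : A) (h : nn < l.length) :
    ((l.set nn v).take (nn+1) = l.take nn ++ [v]) ∧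
    ((l.set nn v).drop (nn+1) = l.drop (nn+1)) ∧
    ((l.set nn v).take nn = l.take nn) ∧
    ((l.set nn v).drop nn = v :: l.drop (nn+1)) := by
  have hlt : (l.take nn).length = nn := List.length_take_of_le h.le
  rw [List.set_eq_take_cons_drop _ h]
  refine ⟨?_, ?_, ?_, ?_⟩
  · rw [show nn + 1 = (l.take nn).length + 1 by rw [hlt], List.take_length_add_append]
    simp
  · rw [show nn + 1 = (l.take nn).length + 1 by rw [hlt], List.drop_length_add_append]
    simp
  · exact List.take_left' hlt
  · exact List.drop_left' hlt

-- B's row builder on the three kinds of rows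
theorem chev_other (nine : Bool) (iv k j : Int) (r : List Int)
    (hk : ¬ k = iv) (hd : ¬ decide (iv < k) = nine) :
    chevRow nine iv j k r = icRow (j+1) r := by
  unfold chevRow icRow
  rw [if_neg hk, if_neg hd, show (j+1-1) = j by ring]

theorem chev_special (nine : Bool) (iv : Int) (jN : Nat) (t s : List Int) (x y : Int)
    (ht : t.length = jN) :
    chevRow nine iv (jN:Int) iv (t ++ x :: y :: s)
    = t ++ (if nine then [(6:Int),3] else [4,5]) ++ y :: s := by
  unfold chevRow
  rw [if_pos rfl, slice_to_decomp t (y::s) x jN ht, slice_from_decomp_succ t (y::s) x jN ht]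

theorem chev_affected (nine : Bool) (iv k : Int) (jN : Nat) (t s : List Int) (x y : Int)
    (ht : t.length = jN) (hk : ¬ k = iv) (hd : decide (iv < k) = nine) :
    chevRow nine iv (jN:Int) k (t ++ x :: y :: s)
    = fixRow (jN:Int) (icRow ((jN:Int)+1) (t ++ x :: y :: s)) := by
  rw [icRow_decomp t s x y jN ht,
      fix_decomp t s x (if x ∈ ogaL ∧ y ∈ odrL then (1:Int) else 0) y jN ht]
  unfold chevRow
  rw [if_neg hk, if_pos hd]
  rw [slice_to_decomp t (y::s) x jN ht, slice_from_decomp_succ t (y::s) x jN ht,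
      pyGetD_decomp t (y::s) x jN ht]
  simp

-- the loop lemma stated on the literal loop body of the port
theorem loop_fix' (j : Int) (n a b : Nat) (M : List (List Int))
    (hb : b ≤ M.length) (hab : a + n = b) :
    (PySem.List.pyRange (a:Int) (b:Int) 1).foldl
      (fun M k =>
        PySem.List.pySetD M k
          (PySem.List.pySetD
            (PySem.List.pySetD (PySem.List.pyGetD M k []) (j+1)
              (PySem.List.pyGetD (PySem.List.pyGetD M k []) j 0)) j
            (if PySem.List.pyGetD
                  (PySem.List.pySetD (PySem.List.pyGetD M k []) (j+1)
                    (PySem.List.pyGetD (PySem.List.pyGetD M k []) j 0)) (j+1) 0 ∈ odrL ∧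
                PySem.List.pyGetD
                  (PySem.List.pySetD (PySem.List.pyGetD M k []) (j+1)
                    (PySem.List.pyGetD (PySem.List.pyGetD M k []) j 0)) (j-1) 0 ∈ ogaL
             then (1:Int) else 0))) M
    = M.take a ++ ((M.drop a).take n).map (fixRow j) ++ M.drop b :=
  loop_fix (fixRow j) n a b M hb hab

-- ===== VERDICT (by name: the statement is the Claim_ definition above) =====
theorem rpdoc_spec : Claim_equal_rpdoc := by
  intro m i j _hdom hpre
  obtain ⟨hIRi, hIRj, hbr⟩ := hpre
  unfold Spec_rpdoc
  by_cases hc : PySem.List.pyGetD (PySem.List.pyGetD m i []) j 0 ∈ ([9,10] : List Int)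
  · obtain ⟨hi0, hj0, hlen⟩ := hbr hc
    obtain ⟨iN, rfl⟩ : ∃ n : Nat, i = (n:Int) := ⟨i.toNat, (Int.toNat_of_nonneg hi0).symm⟩
    obtain ⟨jN, rfl⟩ : ∃ n : Nat, j = (n:Int) := ⟨j.toNat, (Int.toNat_of_nonneg hj0).symm⟩
    have him : iN < m.length := by
      unfold PySem.Raise.InRange at hIRi; omega
    have hlenN : ∀ r ∈ m, jN + 1 < r.length := by
      intro r hrm; have := hlen r hrm; omega
    have hrowm : PySem.List.pyGetD m (iN:Int) [] = m[iN] := by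
      rw [PySem.List.pyGetD_eq_getElem m [] (by positivity) (by exact_mod_cast him)]
      simp
    obtain ⟨t, x, y, s, hr, ht⟩ := row_decomp m[iN] jN (hlenN _ (List.getElem_mem him))
    have hx0 : PySem.List.pyGetD (PySem.List.pyGetD m (iN:Int) []) (jN:Int) 0 = x := by
      rw [hrowm, hr]; exact pyGetD_decomp t (y::s) x jN ht
    rw [hx0] at hc
    have hmap1 : PySem.List.pyGetD (m.map (icRow ((jN:Int)+1))) (iN:Int) []
        = icRow ((jN:Int)+1) m[iN] := by
      rw [PySem.List.pyGetD_eq_getElem _ [] (by positivity)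
            (by rw [List.length_map]; exact_mod_cast him)]
      simp
    have hmi : iN < (m.map (icRow ((jN:Int)+1))).length := by simpa using him
    have hmsplit : m = m.take iN ++ (t ++ x :: y :: s) :: m.drop (iN+1) := by
      rw [← hr]
      conv_lhs => rw [← List.take_append_drop iN m, List.drop_eq_getElem_cons him]
    have htklen : (m.take iN).length = iN := List.length_take_of_le him.le
    simp only [rpdoc, rpdoc_alt, hx0]
    rw [if_pos hc, if_neg (not_not_intro hc)]
    rw [icolonne_eq_map, hmap1, hr, icRow_decomp t s x y jN ht,
        pyGetD_decomp t (_ :: y :: s) x jN ht]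
    have hxcase : x = 9 ∨ x = 10 := by simpa using hc
    rcases hxcase with rfl | rfl
    · -- x = 9
      rw [if_pos rfl]
      rw [pySet_succ_decomp t (y::s) 9 _ 3 jN ht]
      have hg2 : PySem.List.pyGetD
          (PySem.List.pySetD (m.map (icRow ((jN:Int)+1))) (iN:Int) (t ++ 9 :: 3 :: y :: s))
          (iN:Int) [] = t ++ 9 :: 3 :: y :: s := by
        rw [PySem.List.pySetD_natCast,
            PySem.List.pyGetD_eq_getElem _ [] (by positivity)
              (by rw [List.length_set, List.length_map]; exact_mod_cast him)]
        simp [List.getElem_set_self]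
      rw [hg2, pySet_here_decomp t (3 :: y :: s) 9 6 jN ht]
      have hset2 : PySem.List.pySetD
            (PySem.List.pySetD (m.map (icRow ((jN:Int)+1))) (iN:Int) (t ++ 9 :: 3 :: y :: s))
            (iN:Int) (t ++ 6 :: 3 :: y :: s)
          = (m.map (icRow ((jN:Int)+1))).set iN (t ++ 6 :: 3 :: y :: s) := by
        rw [PySem.List.pySetD_natCast, PySem.List.pySetD_natCast, List.set_set]
      rw [hset2]
      rw [show ((m.map (icRow ((jN:Int)+1))).set iN (t ++ 6 :: 3 :: y :: s)).length = m.length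
          by simp]
      have hloop := loop_fix' (jN:Int) (m.length - (iN+1)) (iN+1) m.length
        ((m.map (icRow ((jN:Int)+1))).set iN (t ++ 6 :: 3 :: y :: s))
        (by simp) (by omega)
      push_cast at hloop
      rw [hloop]
      obtain ⟨htk, hdp, -, -⟩ := set_take_drop (m.map (icRow ((jN:Int)+1))) iN
        (t ++ 6 :: 3 :: y :: s) hmi
      rw [htk, hdp]
      rw [List.take_of_length_le
            (show (List.drop (iN+1) (List.map (icRow ((jN:Int)+1)) m)).length
                ≤ m.length - (iN+1) by simp)]
      rw [show ((m.map (icRow ((jN:Int)+1))).set iN (t ++ 6 :: 3 :: y :: s)).drop m.length = []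
          by apply List.drop_eq_nil_of_le; simp]
      -- B side
      conv_rhs => rw [hmsplit]
      rw [PySem.List.enumerate_append, List.map_append, PySem.List.enumerate_cons,
          List.map_cons]
      rw [enum_map_eq_map _ (icRow ((jN:Int)+1)) (m.take iN) 0 ?h1]
      case h1 =>
        intro k r hrm hk1 hk2
        apply chev_other
        · rw [htklen] at hk2; omega
        · rw [htklen] at hk2; simp only [show ((9:Int) == 9) = true by decide]
          simp; omega
      rw [enum_map_eq_map _
            (fun r => fixRow (jN:Int) (icRow ((jN:Int)+1) r)) (m.drop (iN+1)) _ ?h2]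
      case h2 =>
        intro k r hrm hk1 hk2
        obtain ⟨t', x', y', s', hr', ht'⟩ :=
          row_decomp r jN (hlenN r (List.mem_of_mem_drop hrm))
        subst hr'
        apply chev_affected _ _ _ _ _ _ _ _ ht'
        · rw [htklen] at hk1; omega
        · rw [htklen] at hk1
          simp only [show ((9:Int) == 9) = true by decide]
          simp; omega
      simp only [htklen]
      rw [show ((0:Int) + (iN:Int)) = (iN:Int) by ring]
      simp only [show ((9:Int) == 9) = true by decide]
      rw [chev_special true (iN:Int) jN t s 9 y ht]
      simp [List.map_take, List.map_drop, List.map_map, Function.comp_def]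
    · -- x = 10
      rw [if_neg (by norm_num)]
      rw [pySet_succ_decomp t (y::s) 10 _ 5 jN ht]
      have hg2 : PySem.List.pyGetD
          (PySem.List.pySetD (m.map (icRow ((jN:Int)+1))) (iN:Int) (t ++ 10 :: 5 :: y :: s))
          (iN:Int) [] = t ++ 10 :: 5 :: y :: s := by
        rw [PySem.List.pySetD_natCast,
            PySem.List.pyGetD_eq_getElem _ [] (by positivity)
              (by rw [List.length_set, List.length_map]; exact_mod_cast him)]
        simp [List.getElem_set_self]
      rw [hg2, pySet_here_decomp t (5 :: y :: s) 10 4 jN ht]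
      have hset2 : PySem.List.pySetD
            (PySem.List.pySetD (m.map (icRow ((jN:Int)+1))) (iN:Int) (t ++ 10 :: 5 :: y :: s))
            (iN:Int) (t ++ 4 :: 5 :: y :: s)
          = (m.map (icRow ((jN:Int)+1))).set iN (t ++ 4 :: 5 :: y :: s) := by
        rw [PySem.List.pySetD_natCast, PySem.List.pySetD_natCast, List.set_set]
      rw [hset2]
      have hloop := loop_fix' (jN:Int) iN 0 iN
        ((m.map (icRow ((jN:Int)+1))).set iN (t ++ 4 :: 5 :: y :: s))
        (by simp; omega) (by omega)
      simp only [Nat.cast_zero, List.take_zero, List.drop_zero, List.nil_append] at hloop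
      rw [hloop]
      obtain ⟨-, -, htk, hdp⟩ := set_take_drop (m.map (icRow ((jN:Int)+1))) iN
        (t ++ 4 :: 5 :: y :: s) hmi
      rw [htk, hdp]
      -- B side
      conv_rhs => rw [hmsplit]
      rw [PySem.List.enumerate_append, List.map_append, PySem.List.enumerate_cons,
          List.map_cons]
      rw [enum_map_eq_map _
            (fun r => fixRow (jN:Int) (icRow ((jN:Int)+1) r)) (m.take iN) 0 ?h1]
      case h1 =>
        intro k r hrm hk1 hk2
        obtain ⟨t', x', y', s', hr', ht'⟩ :=
          row_decomp r jN (hlenN r (List.mem_of_mem_take hrm))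
        subst hr'
        apply chev_affected _ _ _ _ _ _ _ _ ht'
        · rw [htklen] at hk2; omega
        · rw [htklen] at hk2
          simp only [show ((10:Int) == 9) = false by decide]
          simp; omega
      rw [enum_map_eq_map _ (icRow ((jN:Int)+1)) (m.drop (iN+1)) _ ?h2]
      case h2 =>
        intro k r hrm hk1 hk2
        apply chev_other
        · rw [htklen] at hk1; omega
        · rw [htklen] at hk1; simp only [show ((10:Int) == 9) = false by decide]
          simp; omega
      simp only [htklen]
      rw [show ((0:Int) + (iN:Int)) = (iN:Int) by ring]
      simp only [show ((10:Int) == 9) = false by decide]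
      rw [chev_special false (iN:Int) jN t s 10 y ht]
      simp [List.map_take, List.map_drop, List.map_map, Function.comp_def]
  · simp [rpdoc, rpdoc_alt, hc]
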